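-- pv_equiv track=rewrite | github.com/nwpuhh/yreason | boomerer/reason.py | _process_oppo_literals_init_soft
-- ===== SOURCE A (Python) =====
-- def _process_oppo_literals_init_soft(wghts, cost):
--     '''
--         processing the opposite literals => the solver accepts positive weights
--         P1: treating the neative literals
--         P2: flipping the id of literals into negative if they have negative weights
--     '''
--     # processing the opposite literals, if any.
--     i, lits = 0, sorted(wghts.keys(), key=lambda l: 2 * abs(l) + (0 if l > 0 else 1))
--     ##################################################
--     while i < len(lits) - 1:
--         if lits[i] == -lits[i + 1]:
--             l1, l2 = lits[i], lits[i + 1]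
--             minw = min(wghts[l1], wghts[l2], key=lambda w: abs(w))
--
--             # updating the weights
--             wghts[l1] -= minw
--             wghts[l2] -= minw
--
--             # updating the cost if there is a conflict between l and -l
--             if wghts[l1] * wghts[l2] > 0:
--                 cost += abs(minw)
--             i += 2
--         else:
--             # not appliable for single version, as there will be no sharing
--             i += 1
--     ##################################################
--
--     # flipping literals with negative weights
--     lits = list(wghts.keys())
--     for l in lits:
--         if wghts[l] < 0:
--             cost += -wghts[l]
--             wghts[-l] = -wghts[l]
--             del wghts[l]
--
--     return wghts, cost
-- ===== SOURCE B (Python) =====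
-- def _process_oppo_literals_init_soft(wghts, cost):
--     # P1 without sorting: each opposite pair {p, -p} is found directly by
--     # membership, keyed on its positive literal; the positive weight is the
--     # first argument of min so ties resolve as in the pair walk.
--     for p in [l for l in wghts if l > 0 and -l in wghts]:
--         wp, wn = wghts[p], wghts[-p]
--         minw = wp if abs(wp) <= abs(wn) else wn
--         wghts[p] = wp - minw
--         wghts[-p] = wn - minw
--         if wghts[p] * wghts[-p] > 0:
--             cost += abs(minw)
--
--     # P2: flip literals with negative weights
--     for l in list(wghts):
--         w = wghts[l]
--         if w < 0:
--             cost -= w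
--             wghts[-l] = -w
--             del wghts[l]
--
--     return wghts, cost
-- ===== Notes on version B (the rewrite author's own statement) =====
-- stated objective: simpler
-- what changed: P1's sort of the keys plus the adjacent-pair while-walk with i+=1/i+=2 is replaced by a direct single pass over the positive literals whose negation is also a key, processing each opposite pair once by membership (no sort, no index loop); P2 stays a snapshot loop.
import Mathlib
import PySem

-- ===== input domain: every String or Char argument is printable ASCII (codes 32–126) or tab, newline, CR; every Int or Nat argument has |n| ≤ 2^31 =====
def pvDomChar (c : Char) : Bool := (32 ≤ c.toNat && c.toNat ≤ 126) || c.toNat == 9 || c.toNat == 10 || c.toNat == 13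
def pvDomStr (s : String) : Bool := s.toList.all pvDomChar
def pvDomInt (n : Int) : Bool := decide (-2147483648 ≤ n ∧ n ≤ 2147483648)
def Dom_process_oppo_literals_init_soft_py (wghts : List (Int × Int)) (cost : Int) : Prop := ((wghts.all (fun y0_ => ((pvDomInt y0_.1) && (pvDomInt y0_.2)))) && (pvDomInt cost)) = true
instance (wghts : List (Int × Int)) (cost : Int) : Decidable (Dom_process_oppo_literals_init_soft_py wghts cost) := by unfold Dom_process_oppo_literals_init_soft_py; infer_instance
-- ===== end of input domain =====

-- B replaces A's sort + adjacent-pair index walk by one membership pass over the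
-- positive literals (objective: simpler). Python A and B both mutate `wghts` in
-- place identically; the ports are pure, about the returned (dict, cost) pair.

-- ===== PORT A =====
-- sort key: 2 * abs(l) + (0 if l > 0 else 1)
def pvKeyA (l : Int) : Int := 2 * |l| + (if 0 < l then 0 else 1)

-- the P1 while loop: i advances by 2 over an adjacent opposite pair, else by 1;
-- ported as recursion over the suffix lits[i:]
def pvLoop1A : List Int → PySem.Dict Int Int → Int → PySem.Dict Int Int × Int
  | l1 :: l2 :: rest, d, c =>
    if l1 = -l2 then
      let w1 := d.getD l1 0
      let w2 := d.getD l2 0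
      let minw := if |w1| ≤ |w2| then w1 else w2
      let d' := (d.insert l1 (w1 - minw)).insert l2 (w2 - minw)
      let c' := if (w1 - minw) * (w2 - minw) > 0 then c + |minw| else c
      pvLoop1A rest d' c'
    else
      pvLoop1A (l2 :: rest) d c
  | _, d, c => (d, c)
  termination_by L _ _ => L.length
  decreasing_by all_goals simp

-- the P2 for loop over a snapshot of the keys
def pvLoop2A : List Int → PySem.Dict Int Int → Int → PySem.Dict Int Int × Int
  | [], d, c => (d, c)
  | l :: ls, d, c =>
    if d.getD l 0 < 0 then
      pvLoop2A ls ((d.insert (-l) (-(d.getD l 0))).erase l) (c + -(d.getD l 0))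
    else
      pvLoop2A ls d c

def process_oppo_literals_init_soft_py (wghts : List (Int × Int)) (cost : Int) : (List (Int × Int)) × Int :=
  let d := PySem.Dict.mk wghts
  let lits := PySem.List.sorted d.keys pvKeyA false
  let r1 := pvLoop1A lits d cost
  let r2 := pvLoop2A r1.1.keys r1.1 r1.2
  (r2.1.items, r2.2)

-- ===== PORT B =====
-- body of B's P1 for loop: resolve the opposite pair {p, -p}, p its positive literal
def pvStepB (s : PySem.Dict Int Int × Int) (p : Int) : PySem.Dict Int Int × Int :=
  let d := s.1
  let wp := d.getD p 0
  let wn := d.getD (-p) 0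
  let minw := if |wp| ≤ |wn| then wp else wn
  ((d.insert p (wp - minw)).insert (-p) (wn - minw),
   if (wp - minw) * (wn - minw) > 0 then s.2 + |minw| else s.2)

-- B's P2 for loop (reads the weight once into w)
def pvLoop2B : List Int → PySem.Dict Int Int → Int → PySem.Dict Int Int × Int
  | [], d, c => (d, c)
  | l :: ls, d, c =>
    let w := d.getD l 0
    if w < 0 then
      pvLoop2B ls ((d.insert (-l) (-w)).erase l) (c - w)
    else
      pvLoop2B ls d c

def process_oppo_literals_init_soft_py_alt (wghts : List (Int × Int)) (cost : Int) : (List (Int × Int)) × Int :=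
  let d := PySem.Dict.mk wghts
  let ps := d.keys.filter (fun l => decide (0 < l) && d.contains (-l))
  let r1 := ps.foldl pvStepB (d, cost)
  let r2 := pvLoop2B r1.1.keys r1.1 r1.2
  (r2.1.items, r2.2)

-- ===== PRECONDITION & SPEC =====
-- Pre_ excludes only association lists with duplicate keys, which do not
-- represent any Python dict (A's argument is a dict, whose keys are distinct).
def Pre_process_oppo_literals_init_soft_py (wghts : List (Int × Int)) (cost : Int) : Prop :=
  (wghts.map Prod.fst).Nodup
instance (wghts : List (Int × Int)) (cost : Int) : Decidable (Pre_process_oppo_literals_init_soft_py wghts cost) := by unfold Pre_process_oppo_literals_init_soft_py; infer_instance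

def pvWitness_process_oppo_literals_init_soft_py : (List (Int × Int)) × Int := ([(1, 2), (-1, -3), (2, -4)], 0)

def Spec_process_oppo_literals_init_soft_py (wghts : List (Int × Int)) (cost : Int) (out : (List (Int × Int)) × Int) : Prop := out = process_oppo_literals_init_soft_py_alt wghts cost
instance (wghts : List (Int × Int)) (cost : Int) (out : (List (Int × Int)) × Int) : Decidable (Spec_process_oppo_literals_init_soft_py wghts cost out) := by unfold Spec_process_oppo_literals_init_soft_py; infer_instance

-- ===== CLAIM (what is proved, stated in full; the proofs are below) =====
def Claim_equal_process_oppo_literals_init_soft_py : Prop := ∀ (wghts : List (Int × Int)) (cost : Int), Dom_process_oppo_literals_init_soft_py wghts cost → Pre_process_oppo_literals_init_soft_py wghts cost → Spec_process_oppo_literals_init_soft_py wghts cost (process_oppo_literals_init_soft_py wghts cost)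

-- ===== LEMMAS AND PROOFS =====

-- the weight subtracted from both members of the pair {p, -p} (p read first)
def pvMinw (d : PySem.Dict Int Int) (p : Int) : Int :=
  if |d.getD p 0| ≤ |d.getD (-p) 0| then d.getD p 0 else d.getD (-p) 0

-- the cost contribution of the pair {p, -p}
def pvCostOf (d : PySem.Dict Int Int) (p : Int) : Int :=
  if (d.getD p 0 - pvMinw d p) * (d.getD (-p) 0 - pvMinw d p) > 0 then |pvMinw d p| else 0

-- total amount subtracted at key k when the pairs listed by P are resolved
def pvDelta (P : List Int) (d : PySem.Dict Int Int) (k : Int) : Int :=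
  if k ∈ P then pvMinw d k else if -k ∈ P then pvMinw d (-k) else 0

-- positive literals of L whose negation is also in L
def pvPairedFilter (L : List Int) : List Int :=
  L.filter (fun l => decide (0 < l) && decide ((-l) ∈ L))

lemma pvLoop2_eq (L : List Int) : ∀ d c, pvLoop2A L d c = pvLoop2B L d c := by
  induction L with
  | nil => intro d c; rfl
  | cons l ls ih =>
      intro d c
      simp only [pvLoop2A, pvLoop2B]
      split_ifs with h
      · rw [ih]; ring_nf
      · exact ih d c

lemma pvStepB_costOf (d : PySem.Dict Int Int) (c p : Int) :
    pvStepB (d, c) p =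
      ((d.insert p (d.getD p 0 - pvMinw d p)).insert (-p) (d.getD (-p) 0 - pvMinw d p),
       c + pvCostOf d p) := by
  simp only [pvStepB, pvMinw, pvCostOf]
  split_ifs <;> simp

-- the canonical, order-independent description of the P1 fold
lemma pvFold_spec (P : List Int) : ∀ (d : PySem.Dict Int Int) (c : Int),
    d.keys.Nodup → P.Nodup →
    (∀ p ∈ P, 0 < p ∧ p ∈ d.keys ∧ -p ∈ d.keys) →
    P.foldl pvStepB (d, c) =
      (PySem.Dict.mk (d.items.map (fun kv => (kv.1, kv.2 - pvDelta P d kv.1))),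
       c + (P.map (pvCostOf d)).sum) := by
  induction P with
  | nil =>
      intro d c hnd hP hmem
      simp [pvDelta]
  | cons p P' ih =>
      intro d c hnd hP hmem
      obtain ⟨hp_pos, hp_in, hnp_in⟩ := hmem p (by simp)
      have hcont_p : d.contains p = true := (PySem.Dict.contains_iff_mem_keys d p).2 hp_in
      have hcont_np : d.contains (-p) = true := (PySem.Dict.contains_iff_mem_keys d (-p)).2 hnp_in
      have hP'pos : ∀ q ∈ P', 0 < q := fun q hq => (hmem q (List.mem_cons_of_mem _ hq)).1
      have hpnot : p ∉ P' := (List.nodup_cons.mp hP).1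
      rw [List.foldl_cons, pvStepB_costOf]
      set wp := d.getD p 0 with hwp
      set wn := d.getD (-p) 0 with hwn
      set m := pvMinw d p with hm
      set d1 := (d.insert p (wp - m)).insert (-p) (wn - m) with hd1
      have hcont_np1 : (d.insert p (wp - m)).contains (-p) = true := by
        rw [PySem.Dict.contains_insert]; simp [hcont_np]
      have hkeys : d1.keys = d.keys := by
        rw [hd1, PySem.Dict.keys_insert_of_contains _ _ hcont_np1,
            PySem.Dict.keys_insert_of_contains _ _ hcont_p]
      have hgetD : ∀ x, d1.getD x 0 = if x = -p then wn - m else if x = p then wp - m else d.getD x 0 := by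
        intro x
        rw [hd1, PySem.Dict.getD_insert, PySem.Dict.getD_insert]
      have hMinw : ∀ q, q ≠ p → q ≠ -p → -q ≠ p → -q ≠ -p → pvMinw d1 q = pvMinw d q := by
        intro q h1 h2 h3 h4
        simp only [pvMinw, hgetD, if_neg h1, if_neg h2, if_neg h3, if_neg h4]
      have hCostOf : ∀ q, q ≠ p → q ≠ -p → -q ≠ p → -q ≠ -p → pvCostOf d1 q = pvCostOf d q := by
        intro q h1 h2 h3 h4
        simp only [pvCostOf, hMinw q h1 h2 h3 h4, hgetD, if_neg h1, if_neg h2, if_neg h3, if_neg h4]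
      have hq4 : ∀ q ∈ P', q ≠ p ∧ q ≠ -p ∧ -q ≠ p ∧ -q ≠ -p := by
        intro q hq
        have hqp := hP'pos q hq
        have hqne : q ≠ p := fun e => hpnot (e ▸ hq)
        refine ⟨hqne, by omega, by omega, fun e => hqne (by omega)⟩
      rw [ih d1 (c + pvCostOf d p) (hkeys ▸ hnd) (List.nodup_cons.mp hP).2
          (fun q hq => ⟨hP'pos q hq, hkeys ▸ (hmem q (List.mem_cons_of_mem _ hq)).2.1,
            hkeys ▸ (hmem q (List.mem_cons_of_mem _ hq)).2.2⟩)]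
      have hnegp_not : (-p) ∉ P' := fun h => absurd (hP'pos _ h) (by omega)
      refine Prod.ext ?_ ?_
      · -- the dicts
        show PySem.Dict.mk (d1.items.map (fun kv => (kv.1, kv.2 - pvDelta P' d1 kv.1))) =
          PySem.Dict.mk (d.items.map (fun kv => (kv.1, kv.2 - pvDelta (p :: P') d kv.1)))
        have hitems : d1.items =
            (d.items.map (fun q => if q.1 == p then (p, wp - m) else q)).map
              (fun q => if q.1 == -p then (-p, wn - m) else q) := by
          rw [hd1, PySem.Dict.items_insert_of_contains _ _ hcont_np1,
              PySem.Dict.items_insert_of_contains _ _ hcont_p]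
        rw [hitems, List.map_map, List.map_map]
        congr 1
        apply List.map_congr_left
        intro kv hkv
        obtain ⟨k, v⟩ := kv
        simp only [Function.comp_apply, beq_iff_eq]
        by_cases hk1 : k = p
        · subst hk1
          have hv : v = wp := by
            rw [hwp]; exact (PySem.Dict.getD_of_mem_items d hkv hnd 0).symm
          have dA : pvDelta P' d1 k = 0 := by
            simp [pvDelta, hpnot, hnegp_not]
          have dB : pvDelta (k :: P') d k = pvMinw d k := by
            simp [pvDelta]
          rw [if_pos rfl, if_neg (show ¬((k : Int), wp - m).1 = -k by simp; omega)]
          simp [dA, dB, hv, hm]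
        · by_cases hk2 : k = -p
          · subst hk2
            have hv : v = wn := by
              rw [hwn]; exact (PySem.Dict.getD_of_mem_items d hkv hnd 0).symm
            have dA : pvDelta P' d1 (-p) = 0 := by
              simp [pvDelta, hpnot, hnegp_not]
            have dB : pvDelta (p :: P') d (-p) = pvMinw d p := by
              simp [pvDelta, hnegp_not, show ¬((-p : Int) = p) from by omega]
            rw [if_neg (show ¬((-p : Int) = p) from by omega),
                if_pos (show ((-p : Int), v).1 = -p from rfl)]
            simp [dA, dB, hv, hm]
          · have hDeq : pvDelta P' d1 k = pvDelta (p :: P') d k := by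
              by_cases hmem1 : k ∈ P'
              · obtain ⟨a1, a2, a3, a4⟩ := hq4 _ hmem1
                simp [pvDelta, hmem1, List.mem_cons, hMinw _ a1 a2 a3 a4]
              · by_cases hmem2 : -k ∈ P'
                · obtain ⟨a1, a2, a3, a4⟩ := hq4 _ hmem2
                  simp [pvDelta, List.mem_cons, hmem1, hmem2, hk1, hMinw _ a1 a2 a3 a4]
                · have e2 : ¬ (-k = p) := fun e => hk2 (by omega)
                  simp [pvDelta, hmem1, hmem2, List.mem_cons, hk1, e2]
            rw [if_neg hk1, if_neg (show ¬((k : Int), v).1 = -p from hk2)]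
            simp [hDeq]
      · -- the costs
        show c + pvCostOf d p + (P'.map (pvCostOf d1)).sum =
          c + ((p :: P').map (pvCostOf d)).sum
        have : P'.map (pvCostOf d1) = P'.map (pvCostOf d) := by
          apply List.map_congr_left
          intro q hq
          obtain ⟨a1, a2, a3, a4⟩ := hq4 _ hq
          exact hCostOf q a1 a2 a3 a4
        rw [this, List.map_cons, List.sum_cons]
        ring

lemma pvKeyA_pos_of_lt_neg (l : Int) (h : pvKeyA l < pvKeyA (-l)) : 0 < l := by
  simp only [pvKeyA, Int.abs_eq_natAbs] at h; split_ifs at h <;> omega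

lemma pvKeyA_neg_of_pos (l : Int) (h : 0 < l) : pvKeyA (-l) = pvKeyA l + 1 := by
  simp only [pvKeyA, Int.abs_eq_natAbs]; split_ifs <;> omega

lemma pvKeyA_inj (a b : Int) (h : pvKeyA a = pvKeyA b) : a = b := by
  simp only [pvKeyA, Int.abs_eq_natAbs] at h; split_ifs at h <;> omega

-- A's while loop over a strictly key-sorted list is the fold over its paired positives
lemma pvLoop1A_eq (L : List Int) (d : PySem.Dict Int Int) (c : Int)
    (h : L.Pairwise (fun a b => pvKeyA a < pvKeyA b)) :
    pvLoop1A L d c = (pvPairedFilter L).foldl pvStepB (d, c) := by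
  revert h
  induction L, d, c using pvLoop1A.induct with
  | case1 l2 rest d c w2 w1 minw d' c' ih =>
      intro h
      have h12 : pvKeyA (-l2) < pvKeyA l2 := (List.pairwise_cons.mp h).1 l2 (by simp)
      have hpos : 0 < -l2 := pvKeyA_pos_of_lt_neg (-l2) (by rwa [neg_neg])
      have h1r : ∀ x ∈ rest, pvKeyA (-l2) < pvKeyA x :=
        fun x hx => (List.pairwise_cons.mp h).1 x (by simp [hx])
      have h2r : ∀ x ∈ rest, pvKeyA l2 < pvKeyA x :=
        fun x hx => (List.pairwise_cons.mp (List.pairwise_cons.mp h).2).1 x hx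
      have hrest : rest.Pairwise (fun a b => pvKeyA a < pvKeyA b) :=
        (List.pairwise_cons.mp (List.pairwise_cons.mp h).2).2
      have hfeq : pvPairedFilter (-l2 :: l2 :: rest) = -l2 :: pvPairedFilter rest := by
        unfold pvPairedFilter
        rw [List.filter_cons]
        rw [if_pos (show (decide (0 < -l2) && decide (-(-l2) ∈ -l2 :: l2 :: rest)) = true from by
          simp [List.mem_cons]; omega)]
        congr 1
        rw [List.filter_cons]
        rw [if_neg (show ¬(decide (0 < l2) && decide (-l2 ∈ -l2 :: l2 :: rest)) = true from by
          have : ¬(0 < l2) := by omega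
          simp [this])]
        apply List.filter_congr
        intro x hx
        have hx1 : x ≠ -l2 := fun e => absurd (h1r x hx) (by simp [e])
        have hx2 : x ≠ l2 := fun e => absurd (h2r x hx) (by simp [e])
        simp [List.mem_cons, show ¬(-x = -l2) from fun e => hx2 (by omega),
          show ¬(-x = l2) from fun e => hx1 (by omega)]
      have hstep : pvStepB (d, c) (-l2) = (d', c') := by
        simp only [pvStepB, neg_neg]; rfl
      rw [hfeq, List.foldl_cons, hstep, ← ih hrest]
      simp only [pvLoop1A, if_true]
      rfl
  | case2 l1 l2 rest d c hpair ih =>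
      intro h
      have h12 : pvKeyA l1 < pvKeyA l2 := (List.pairwise_cons.mp h).1 l2 (by simp)
      have h2r : ∀ x ∈ rest, pvKeyA l2 < pvKeyA x :=
        fun x hx => (List.pairwise_cons.mp (List.pairwise_cons.mp h).2).1 x hx
      have htail : (l2 :: rest).Pairwise (fun a b => pvKeyA a < pvKeyA b) :=
        (List.pairwise_cons.mp h).2
      have hfeq : pvPairedFilter (l1 :: l2 :: rest) = pvPairedFilter (l2 :: rest) := by
        unfold pvPairedFilter
        rw [List.filter_cons]
        rw [if_neg (show ¬(decide (0 < l1) && decide (-l1 ∈ l1 :: l2 :: rest)) = true from by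
          by_cases hl1 : 0 < l1
          · have n1 : ¬(-l1 = l1) := by omega
            have n2 : ¬(-l1 = l2) := fun e => hpair (by omega)
            have n3 : -l1 ∉ rest := fun hmem => by
              have k1 := h2r _ hmem
              have k2 := pvKeyA_neg_of_pos l1 hl1
              omega
            simp [List.mem_cons, n1, n2, n3]
          · simp [hl1])]
        apply List.filter_congr
        intro x hx
        by_cases h0 : 0 < x
        · have hlt : pvKeyA l1 < pvKeyA x :=
            (List.pairwise_cons.mp h).1 x (by simp [List.mem_cons.mp hx])
          have hne : ¬(-x = l1) := fun e => by
            have := pvKeyA_pos_of_lt_neg (-x) (by rw [neg_neg]; exact e ▸ hlt)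
            omega
          simp [List.mem_cons, hne]
        · simp [h0]
      rw [hfeq, ← ih htail]
      simp only [pvLoop1A]
      rw [if_neg hpair]
  | case3 x d c hx =>
      intro h
      match x, hx with
      | [], _ => simp [pvLoop1A, pvPairedFilter]
      | [a], _ =>
          have hz : ¬(0 < a ∧ -a = a) := by omega
          simp [pvLoop1A, pvPairedFilter, hz]
      | a :: b :: t, hx => exact ((hx a b t rfl)).elim

-- ===== VERDICT (by name: the statement is the Claim_ definition above) =====
theorem process_oppo_literals_init_soft_py_spec : Claim_equal_process_oppo_literals_init_soft_py := by
  unfold Claim_equal_process_oppo_literals_init_soft_py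
  intro wghts cost _ hpre
  unfold Pre_process_oppo_literals_init_soft_py at hpre
  unfold Spec_process_oppo_literals_init_soft_py
  unfold process_oppo_literals_init_soft_py process_oppo_literals_init_soft_py_alt
  dsimp only
  set d : PySem.Dict Int Int := PySem.Dict.mk wghts with hd
  have hnd : d.keys.Nodup := by
    rw [hd]; simpa [PySem.Dict.keys_mk] using hpre
  set L := PySem.List.sorted d.keys pvKeyA false with hL
  have hperm : L.Perm d.keys := PySem.List.sorted_perm _ _ _
  have hLnd : L.Nodup := hperm.nodup_iff.mpr hnd
  have hpw : L.Pairwise (fun a b => pvKeyA a < pvKeyA b) := by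
    have h1 : L.Pairwise (fun a b => pvKeyA a ≤ pvKeyA b) :=
      PySem.List.sorted_pairwise d.keys pvKeyA
    exact (h1.and hLnd).imp
      (fun hab => lt_of_le_of_ne hab.1 (fun e => hab.2 (pvKeyA_inj _ _ e)))
  set PB := d.keys.filter (fun l => decide (0 < l) && d.contains (-l)) with hPB
  have hfilt : pvPairedFilter L = L.filter (fun l => decide (0 < l) && d.contains (-l)) := by
    unfold pvPairedFilter
    apply List.filter_congr
    intro x _
    congr 1
    rw [PySem.Dict.contains_eq_decide_mem_keys]
    simp [hperm.mem_iff]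
  have hPperm : (pvPairedFilter L).Perm PB := by
    rw [hfilt, hPB]; exact hperm.filter _
  have hPnd : (pvPairedFilter L).Nodup := hLnd.filter _
  have hPmem : ∀ p ∈ pvPairedFilter L, 0 < p ∧ p ∈ d.keys ∧ -p ∈ d.keys := by
    intro p hp
    obtain ⟨hmemL, hcond⟩ := List.mem_filter.mp hp
    simp only [Bool.and_eq_true, decide_eq_true_eq] at hcond
    exact ⟨hcond.1, hperm.mem_iff.mp hmemL, hperm.mem_iff.mp hcond.2⟩
  have hBnd : PB.Nodup := hnd.filter _
  have hBmem : ∀ p ∈ PB, 0 < p ∧ p ∈ d.keys ∧ -p ∈ d.keys := by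
    intro p hp
    obtain ⟨hmemK, hcond⟩ := List.mem_filter.mp hp
    simp only [Bool.and_eq_true, decide_eq_true_eq,
      PySem.Dict.contains_iff_mem_keys] at hcond
    exact ⟨hcond.1, hmemK, hcond.2⟩
  have hstate : pvLoop1A L d cost = PB.foldl pvStepB (d, cost) := by
    rw [pvLoop1A_eq L d cost hpw,
        pvFold_spec _ d cost hnd hPnd hPmem,
        pvFold_spec _ d cost hnd hBnd hBmem]
    refine Prod.ext ?_ ?_
    · show PySem.Dict.mk _ = PySem.Dict.mk _
      congr 1
      apply List.map_congr_left
      intro kv _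
      have hdel : pvDelta (pvPairedFilter L) d kv.1 = pvDelta PB d kv.1 := by
        simp [pvDelta, hPperm.mem_iff]
      rw [hdel]
    · show cost + _ = cost + _
      rw [(hPperm.map (pvCostOf d)).sum_eq]
  rw [hstate, pvLoop2_eq]
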